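-- pv_equiv track=rewrite | github.com/pypi-data/pypi-mirror-383 | packages/fireducks/fireducks-1.4.3-cp313-cp313-macosx_14_0_arm64.whl/fireducks/pandas/utils.py | get_unique_column_name
-- ===== SOURCE A (Python) =====
-- def get_unique_column_name(column_names, validate=True):
--     """
--     DESC: return a unique column name which is possibly not
--           a part of input "column_names"
--     PARAMS: column_names:  an array-like containing the existing names of columns
--             validate: whether to check the generated name belongs to the existing names.
--                       if False "column_names" will be ignored.
--     RETURN: String containing the resultant unique name
--     """
--     n = 0
--     prefix = "__fireducks_tmp_col__"
--     name = prefix + str(n)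
--     if validate:
--         column_set = set(column_names)
--         while name in column_set:
--             n += 1
--             name = prefix + str(n)
--     return name
-- ===== SOURCE B (Python) =====
-- def _suffix_value(s):
--     """Value of s if s is a canonical decimal as produced by str() on a
--     non-negative int (digits only, no leading zero unless s == "0"), else None."""
--     if not s or (s[0] == "0" and len(s) > 1):
--         return None
--     k = 0
--     for ch in s:
--         if not ("0" <= ch <= "9"):
--             return None
--         k = 10 * k + (ord(ch) - 48)
--     return k
--
--
-- def get_unique_column_name(column_names, validate=True):
--     """
--     DESC: return a unique column name which is possibly not
--           a part of input "column_names"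
--     """
--     prefix = "__fireducks_tmp_col__"
--     if not validate:
--         return prefix + "0"
--     p = len(prefix)
--     used = set()
--     for name in column_names:
--         if name.startswith(prefix):
--             k = _suffix_value(name[p:])
--             if k is not None:
--                 used.add(k)
--     n = 0
--     for k in sorted(used):
--         if k == n:
--             n += 1
--         elif k > n:
--             break
--     return prefix + str(n)
-- ===== Notes on version B (the rewrite author's own statement) =====
-- stated objective: alternative
-- what changed: A probes prefix+str(n) against a set of full names in a while loop; B instead strictly parses each name's suffix into a non-negative integer (canonical decimals only), sorts the distinct parsed suffixes, and finds the first gap (mex) by a single linear scan of the sorted list.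
import Mathlib
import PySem

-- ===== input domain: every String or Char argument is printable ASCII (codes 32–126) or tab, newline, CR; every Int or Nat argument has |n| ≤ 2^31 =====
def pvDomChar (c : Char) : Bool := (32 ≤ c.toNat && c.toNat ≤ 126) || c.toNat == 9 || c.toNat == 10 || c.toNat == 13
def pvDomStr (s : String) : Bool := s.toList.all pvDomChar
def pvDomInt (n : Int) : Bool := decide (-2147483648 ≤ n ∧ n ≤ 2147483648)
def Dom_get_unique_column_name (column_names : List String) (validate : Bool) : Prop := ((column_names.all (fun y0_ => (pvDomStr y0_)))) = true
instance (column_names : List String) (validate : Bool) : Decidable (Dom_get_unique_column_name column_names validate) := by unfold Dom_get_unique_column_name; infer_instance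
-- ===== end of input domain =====

-- B replaces A's probe-until-free loop by a different algorithm: strictly parse each name's
-- suffix to a non-negative integer, sort the distinct parsed suffixes, scan once for the first gap (mex).

-- the shared string constant "__fireducks_tmp_col__", as a character list
def pvPrefix : List Char := "__fireducks_tmp_col__".toList

-- ===== PORT A =====
-- the while loop of A: state is (n, name); fuel only makes the recursion total (a free name is
-- found after at most |column_names| + 1 probes, and the port is always run with that much fuel)
def pvLoopA (column_set : PySem.Set String) (fuel : Nat) (n : Int) (name : String) : String :=
  match fuel with
  | 0 => name
  | fuel + 1 =>
    if name ∈ column_set then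
      pvLoopA column_set fuel (n + 1) (String.ofList (pvPrefix ++ PySem.Int.toChars (n + 1)))
    else name

def get_unique_column_name (column_names : List String) (validate : Bool) : String :=
  let name := String.ofList (pvPrefix ++ PySem.Int.toChars 0)
  if validate then
    pvLoopA (PySem.Set.ofList column_names) (column_names.length + 1) 0 name
  else name

-- ===== PORT B =====
-- the for loop of _suffix_value: k = 10*k + (ord(ch) - 48), early return None on a non-digit
def pvParseLoop : List Char → Nat → Option Nat
  | [], k => some k
  | c :: cs, k => if '0' ≤ c ∧ c ≤ '9' then pvParseLoop cs (10 * k + (c.toNat - 48)) else none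

-- _suffix_value: value of a canonical decimal (no leading zero unless "0"), else None
def pvSuffixValue (s : List Char) : Option Nat :=
  if s = [] ∨ (s.head? = some '0' ∧ 1 < s.length) then none else pvParseLoop s 0

-- the first for loop of B: used = set(); used.add(k) for each strictly parsed suffix
def pvUsed (column_names : List String) : PySem.Set Nat :=
  column_names.foldl (fun used name =>
    if PySem.Chars.startswith name.toList pvPrefix then
      match pvSuffixValue (name.toList.drop pvPrefix.length) with
      | some k => used.add k
      | none => used
    else used) PySem.Set.empty

-- the second for loop of B: n = 0; for k in sorted(used): if k == n: n += 1 elif k > n: break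
def pvScan : List Nat → Nat → Nat
  | [], n => n
  | k :: rest, n =>
    if k = n then pvScan rest (n + 1)
    else if n < k then n
    else pvScan rest n

def get_unique_column_name_alt (column_names : List String) (validate : Bool) : String :=
  if validate then
    String.ofList (pvPrefix ++ PySem.Int.toChars
      ((pvScan (PySem.List.sorted (pvUsed column_names) (fun x => x)) 0 : Nat) : Int))
  else String.ofList (pvPrefix ++ ['0'])

-- ===== PRECONDITION & SPEC =====
def Spec_get_unique_column_name (column_names : List String) (validate : Bool) (out : String) : Prop := out = get_unique_column_name_alt column_names validate
instance (column_names : List String) (validate : Bool) (out : String) : Decidable (Spec_get_unique_column_name column_names validate out) := by unfold Spec_get_unique_column_name; infer_instance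

-- ===== CLAIM (what is proved, stated in full; the proofs are below) =====
def Claim_equal_get_unique_column_name : Prop := ∀ (column_names : List String) (validate : Bool), Dom_get_unique_column_name column_names validate → Spec_get_unique_column_name column_names validate (get_unique_column_name column_names validate)

-- ===== LEMMAS AND PROOFS =====

-- the candidate name for a non-negative counter value m: prefix + str(m)
def pvNm (m : Nat) : String := String.ofList (pvPrefix ++ PySem.Int.toChars (m : Int))

-- str(k) for a non-negative int is Nat.toDigits 10 k
lemma pv_toChars_natCast (k : Nat) : PySem.Int.toChars (k : Int) = Nat.toDigits 10 k := by
  simp [PySem.Int.toChars]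

-- one-step unfolding of Nat.toDigitsCore
lemma pv_core_succ (b f n : Nat) (ds : List Char) :
    Nat.toDigitsCore b (f + 1) n ds =
      (if n / b = 0 then Nat.digitChar (n % b) :: ds
       else Nat.toDigitsCore b f (n / b) (Nat.digitChar (n % b) :: ds)) := by
  rw [Nat.toDigitsCore]

-- the accumulator of toDigitsCore is just appended on the right
lemma pv_core_acc (b : Nat) : ∀ (f n : Nat) (acc : List Char),
    Nat.toDigitsCore b f n acc = Nat.toDigitsCore b f n [] ++ acc := by
  intro f
  induction f with
  | zero => intro n acc; rw [Nat.toDigitsCore, Nat.toDigitsCore]; rfl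
  | succ f ih =>
    intro n acc
    rw [pv_core_succ, pv_core_succ]
    by_cases h : n / b = 0
    · simp [h]
    · rw [if_neg h, if_neg h, ih (n / b) (Nat.digitChar (n % b) :: acc),
        ih (n / b) [Nat.digitChar (n % b)]]
      simp

-- fuel irrelevance of toDigitsCore (base 10): any fuel above n gives str(n)
lemma pv_core_fuel (n : Nat) : ∀ (f : Nat), n < f → Nat.toDigitsCore 10 f n [] = Nat.toDigits 10 n := by
  induction n using Nat.strong_induction_on with
  | _ n ih =>
    intro f hf
    match f, hf with
    | f + 1, hf =>
      rw [Nat.toDigits, pv_core_succ]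
      by_cases h0 : n / 10 = 0
      · rw [if_pos h0, pv_core_succ, if_pos h0]
      · rw [if_neg h0, pv_core_succ, if_neg h0,
          pv_core_acc 10 f (n / 10), pv_core_acc 10 n (n / 10),
          ih (n / 10) (by omega) f (by omega), ih (n / 10) (by omega) n (by omega)]

-- str(n) for n < 10
lemma pv_toDigits_small (n : Nat) (h : n < 10) : Nat.toDigits 10 n = [Nat.digitChar n] := by
  rw [Nat.toDigits, pv_core_succ, if_pos (by omega), Nat.mod_eq_of_lt h]

-- the recursion str(n) = str(n // 10) + digit(n % 10) for n ≥ 10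
lemma pv_toDigits_rec (n : Nat) (h : 10 ≤ n) :
    Nat.toDigits 10 n = Nat.toDigits 10 (n / 10) ++ [Nat.digitChar (n % 10)] := by
  rw [Nat.toDigits, pv_core_succ, if_neg (by omega), pv_core_acc 10 n (n / 10),
    pv_core_fuel (n / 10) n (by omega)]

lemma pv_digitChar_spec (d : Nat) (h : d < 10) :
    ('0' ≤ Nat.digitChar d ∧ Nat.digitChar d ≤ '9') ∧ (Nat.digitChar d).toNat = 48 + d := by
  interval_cases d <;> exact ⟨by decide, by decide⟩

lemma pv_char_toNat_bounds (c : Char) (h1 : '0' ≤ c) (h2 : c ≤ '9') :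
    48 ≤ c.toNat ∧ c.toNat ≤ 57 := by
  exact ⟨h1, h2⟩

lemma pv_digitChar_of_digit (c : Char) (h1 : '0' ≤ c) (h2 : c ≤ '9') :
    Nat.digitChar (c.toNat - 48) = c := by
  obtain ⟨hl, hr⟩ := pv_char_toNat_bounds c h1 h2
  apply Char.eq_of_val_eq
  apply UInt32.toNat_inj.mp
  show (Nat.digitChar (c.toNat - 48)).toNat = c.toNat
  have hd : c.toNat - 48 < 10 := by omega
  rw [(pv_digitChar_spec (c.toNat - 48) hd).2]
  omega

-- parsing a concatenation: parse the left part, continue with its value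
lemma pv_parseLoop_append (xs : List Char) : ∀ (ys : List Char) (a : Nat),
    pvParseLoop (xs ++ ys) a = (pvParseLoop xs a).bind (pvParseLoop ys) := by
  induction xs with
  | nil => intro ys a; rfl
  | cons c cs ih =>
    intro ys a
    by_cases h : '0' ≤ c ∧ c ≤ '9'
    · simp only [List.cons_append, pvParseLoop, if_pos h]; exact ih ys _
    · simp only [List.cons_append, pvParseLoop, if_neg h, Option.bind]

-- the parse loop applied to str(k) succeeds and returns k (shifted by the accumulator)
lemma pv_parseLoop_toDigits (k : Nat) : ∀ (a : Nat),
    pvParseLoop (Nat.toDigits 10 k) a = some (a * 10 ^ (Nat.toDigits 10 k).length + k) := by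
  induction k using Nat.strong_induction_on with
  | _ k ih =>
    intro a
    by_cases h : k < 10
    · rw [pv_toDigits_small k h]
      obtain ⟨⟨h1, h2⟩, h3⟩ := pv_digitChar_spec k h
      simp only [pvParseLoop, if_pos (And.intro h1 h2), h3, List.length_singleton, pow_one]
      exact congrArg some (by omega)
    · rw [pv_toDigits_rec k (by omega)]
      rw [pv_parseLoop_append _ _ a, ih (k / 10) (by omega) a]
      obtain ⟨⟨h1, h2⟩, h3⟩ := pv_digitChar_spec (k % 10) (by omega)
      simp only [Option.bind_some, pvParseLoop, if_pos (And.intro h1 h2), h3,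
        List.length_append, List.length_singleton]
      congr 1
      have hmod := Nat.div_add_mod k 10
      ring_nf
      omega

lemma pv_toDigits_ne_nil (k : Nat) : Nat.toDigits 10 k ≠ [] := by
  by_cases h : k < 10
  · rw [pv_toDigits_small k h]; simp
  · rw [pv_toDigits_rec k (by omega)]; simp

-- str(k) for k > 0 does not start with '0'
lemma pv_toDigits_head (k : Nat) (hk : 0 < k) : (Nat.toDigits 10 k).head? ≠ some '0' := by
  induction k using Nat.strong_induction_on with
  | _ k ih =>
    by_cases h : k < 10
    · rw [pv_toDigits_small k h]
      interval_cases k <;> decide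
    · rw [pv_toDigits_rec k (by omega),
        List.head?_append_of_ne_nil _ (pv_toDigits_ne_nil (k / 10))]
      exact ih (k / 10) (by omega) (by omega)

-- _suffix_value inverts str on non-negative integers
lemma pv_suffix_toDigits (k : Nat) : pvSuffixValue (Nat.toDigits 10 k) = some k := by
  rcases Nat.eq_zero_or_pos k with rfl | hk
  · decide
  · rw [pvSuffixValue,
      if_neg (by
        push_neg
        exact ⟨pv_toDigits_ne_nil k, fun h => absurd h (pv_toDigits_head k hk)⟩),
      pv_parseLoop_toDigits k 0]
    simp

-- a successful parse of s ++ [c] factors through a successful parse of s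
lemma pv_parseLoop_snoc (s : List Char) (c : Char) (v : Nat)
    (h : pvParseLoop (s ++ [c]) 0 = some v) :
    ∃ w, pvParseLoop s 0 = some w ∧ ('0' ≤ c ∧ c ≤ '9') ∧ v = 10 * w + (c.toNat - 48) := by
  rw [pv_parseLoop_append] at h
  cases hw : pvParseLoop s 0 with
  | none => rw [hw] at h; simp at h
  | some w =>
    rw [hw] at h
    by_cases hc : '0' ≤ c ∧ c ≤ '9'
    · simp only [Option.bind_some, pvParseLoop, if_pos hc] at h
      exact ⟨w, rfl, hc, by simpa [pvParseLoop] using h.symm⟩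
    · simp [pvParseLoop, if_neg hc] at h

-- the parse value only grows along the loop
lemma pv_parseLoop_ge : ∀ (s : List Char) (a v : Nat), pvParseLoop s a = some v → a ≤ v := by
  intro s
  induction s with
  | nil => intro a v h; simp [pvParseLoop] at h; omega
  | cons c cs ih =>
    intro a v h
    by_cases hc : '0' ≤ c ∧ c ≤ '9'
    · rw [pvParseLoop, if_pos hc] at h
      have := ih _ _ h
      omega
    · rw [pvParseLoop, if_neg hc] at h; simp at h

-- a nonempty digit string not starting with '0' has a positive value
lemma pv_parseLoop_pos (c : Char) (cs : List Char) (v : Nat)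
    (hne : c ≠ '0') (h : pvParseLoop (c :: cs) 0 = some v) : 1 ≤ v := by
  by_cases hc : '0' ≤ c ∧ c ≤ '9'
  · rw [pvParseLoop, if_pos hc] at h
    have := pv_parseLoop_ge cs _ v h
    have hb := pv_char_toNat_bounds c hc.1 hc.2
    have : c.toNat ≠ 48 := by
      intro h48
      exact hne (by
        apply Char.eq_of_val_eq
        apply UInt32.toNat_inj.mp
        simpa using h48)
    omega
  · rw [pvParseLoop, if_neg hc] at h; simp at h

-- canonicity: a string _suffix_value accepts with value k IS str(k)
lemma pv_suffix_canon (s : List Char) : ∀ (k : Nat), pvSuffixValue s = some k → s = Nat.toDigits 10 k := by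
  induction s using List.reverseRecOn with
  | nil => intro k h; simp [pvSuffixValue] at h
  | append_singleton ds c ih =>
    intro k h
    rw [pvSuffixValue] at h
    split_ifs at h with hguard
    push_neg at hguard
    obtain ⟨hne, hlead⟩ := hguard
    obtain ⟨w, hw, hc, hv⟩ := pv_parseLoop_snoc ds c k h
    cases ds with
    | nil =>
      have : k = c.toNat - 48 := by
        simp [pvParseLoop] at hw
        omega
      have hk10 : k < 10 := by
        have := pv_char_toNat_bounds c hc.1 hc.2
        omega
      rw [pv_toDigits_small k hk10, this, pv_digitChar_of_digit c hc.1 hc.2,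
        List.nil_append]
    | cons d dt =>
      have hhead : d ≠ '0' := by
        intro rfl'
        have hlen := hlead (by simp [rfl'])
        simp at hlen
      have hwpos : 1 ≤ w := pv_parseLoop_pos d dt w hhead hw
      have hcb := pv_char_toNat_bounds c hc.1 hc.2
      have hk10 : 10 ≤ k := by omega
      rw [pv_toDigits_rec k hk10]
      have hdiv : k / 10 = w := by omega
      have hmod : k % 10 = c.toNat - 48 := by omega
      rw [hdiv, hmod, pv_digitChar_of_digit c hc.1 hc.2]
      have hds : (d :: dt) = Nat.toDigits 10 w := by
        apply ih w
        rw [pvSuffixValue, if_neg ?_]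
        · exact hw
        · push_neg
          exact ⟨by simp, fun hh => (hhead (by simpa using hh)).elim⟩
      rw [← hds]

-- pvNm is injective
lemma pv_Nm_inj (m₁ m₂ : Nat) (h : pvNm m₁ = pvNm m₂) : m₁ = m₂ := by
  have h1 : pvPrefix ++ PySem.Int.toChars (m₁ : Int) = pvPrefix ++ PySem.Int.toChars (m₂ : Int) := by
    have := congrArg String.toList h
    simpa [pvNm] using this
  have h2 : Nat.toDigits 10 m₁ = Nat.toDigits 10 m₂ := by
    have := List.append_cancel_left h1
    rwa [pv_toChars_natCast, pv_toChars_natCast] at this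
  have := congrArg pvSuffixValue h2
  rw [pv_suffix_toDigits, pv_suffix_toDigits] at this
  exact Option.some.inj this

-- membership in the used-suffix set built by B's first loop
lemma pv_mem_used (column_names : List String) (k : Nat) :
    k ∈ pvUsed column_names ↔
      ∃ s ∈ column_names, PySem.Chars.startswith s.toList pvPrefix = true ∧
        pvSuffixValue (s.toList.drop pvPrefix.length) = some k := by
  rw [pvUsed]
  have main : ∀ (l : List String) (acc : PySem.Set Nat),
      (k ∈ l.foldl (fun used name =>
        if PySem.Chars.startswith name.toList pvPrefix then
          match pvSuffixValue (name.toList.drop pvPrefix.length) with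
          | some k => used.add k
          | none => used
        else used) acc) ↔
      (k ∈ acc ∨ ∃ s ∈ l, PySem.Chars.startswith s.toList pvPrefix = true ∧
        pvSuffixValue (s.toList.drop pvPrefix.length) = some k) := by
    intro l
    induction l with
    | nil => intro acc; simp
    | cons s t ih =>
      intro acc
      simp only [List.foldl_cons, List.mem_cons]
      rw [ih]
      by_cases hs : PySem.Chars.startswith s.toList pvPrefix
      · rw [if_pos hs]
        cases hv : pvSuffixValue (s.toList.drop pvPrefix.length) with
        | none =>
          constructor
          · rintro (h | h)
            · exact Or.inl h
            · obtain ⟨x, hx, hp⟩ := h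
              exact Or.inr ⟨x, Or.inr hx, hp⟩
          · rintro (h | ⟨x, (rfl | hx), hrest⟩)
            · exact Or.inl h
            · rw [hv] at hrest; simp at hrest
            · exact Or.inr ⟨x, hx, hrest⟩
        | some v =>
          rw [PySem.Set.mem_add]
          constructor
          · rintro ((h | rfl) | h)
            · exact Or.inl h
            · exact Or.inr ⟨s, Or.inl rfl, hs, hv⟩
            · obtain ⟨x, hx, hp⟩ := h
              exact Or.inr ⟨x, Or.inr hx, hp⟩
          · rintro (h | ⟨x, (rfl | hx), hstart, hrest⟩)
            · exact Or.inl (Or.inl h)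
            · rw [hv] at hrest
              exact Or.inl (Or.inr (Option.some.inj hrest).symm)
            · exact Or.inr ⟨x, hx, hstart, hrest⟩
      · rw [if_neg hs]
        constructor
        · rintro (h | h)
          · exact Or.inl h
          · obtain ⟨x, hx, hp⟩ := h
            exact Or.inr ⟨x, Or.inr hx, hp⟩
        · rintro (h | ⟨x, (rfl | hx), hstart, hrest⟩)
          · exact Or.inl h
          · exact absurd hstart (by simpa using hs)
          · exact Or.inr ⟨x, hx, hstart, hrest⟩
  rw [main]
  simp [PySem.Set.empty_eq]

-- splitting a list at a known prefix
lemma pv_append_eq_iff (P t l : List Char) :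
    (l = P ++ t) ↔ (P.isPrefixOf l ∧ l.drop P.length = t) := by
  constructor
  · rintro rfl
    simp [List.isPrefixOf_iff_prefix]
  · rintro ⟨hp, rfl⟩
    rw [List.isPrefixOf_iff_prefix] at hp
    obtain ⟨u, rfl⟩ := hp
    simp

-- the two views of "counter value m is taken" agree
lemma pv_used_iff_mem (column_names : List String) (m : Nat) :
    m ∈ pvUsed column_names ↔ pvNm m ∈ PySem.Set.ofList column_names := by
  rw [pv_mem_used, PySem.Set.mem_ofList]
  constructor
  · rintro ⟨s, hs, hstart, hval⟩
    have hsplit : s.toList = pvPrefix ++ Nat.toDigits 10 m := by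
      rw [pv_append_eq_iff]
      refine ⟨by simpa [PySem.Chars.startswith] using hstart, pv_suffix_canon _ m hval⟩
    have : s = pvNm m := by
      rw [pvNm, pv_toChars_natCast, ← hsplit]
      exact (String.ofList_toList (s := s)).symm
    rwa [← this]
  · intro hmem
    refine ⟨pvNm m, hmem, ?_, ?_⟩
    · simp [pvNm, PySem.Chars.startswith, List.isPrefixOf_iff_prefix]
    · rw [pvNm, pv_toChars_natCast]
      have : (String.ofList (pvPrefix ++ Nat.toDigits 10 m)).toList = pvPrefix ++ Nat.toDigits 10 m := by
        simp
      rw [this, List.drop_left, pv_suffix_toDigits]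

-- pigeonhole: some counter value in 0..|column_names| is free
lemma pv_exists_free (column_names : List String) :
    ∃ m ≤ column_names.length, pvNm m ∉ PySem.Set.ofList column_names := by
  by_contra hall
  push_neg at hall
  have hsub : ((List.range (column_names.length + 1)).map pvNm) ⊆ column_names := by
    intro x hx
    obtain ⟨m, hm, rfl⟩ := List.mem_map.mp hx
    rw [List.mem_range] at hm
    exact PySem.Set.mem_ofList column_names _ |>.mp (hall m (by omega))
  have hnodup : ((List.range (column_names.length + 1)).map pvNm).Nodup :=
    List.Nodup.map (fun a b => pv_Nm_inj a b) (List.nodup_range)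
  have := (hnodup.subperm hsub).length_le
  simp at this

-- A's probe loop, run with enough fuel, stops at the least free counter value ≥ its start
lemma pv_loopA_spec (S : PySem.Set String) : ∀ (fuel n : Nat),
    (∃ m, n ≤ m ∧ m < n + fuel ∧ pvNm m ∉ S) →
    ∃ r, pvLoopA S fuel (n : Int) (pvNm n) = pvNm r ∧ n ≤ r ∧ pvNm r ∉ S ∧
      ∀ m, n ≤ m → m < r → pvNm m ∈ S := by
  intro fuel
  induction fuel with
  | zero =>
    intro n ⟨m, h1, h2, _⟩
    omega
  | succ fuel ih =>
    intro n hstop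
    rw [pvLoopA]
    by_cases hmem : pvNm n ∈ S
    · rw [if_pos hmem]
      have hcast : (n : Int) + 1 = ((n + 1 : Nat) : Int) := by push_cast; ring
      have hname : String.ofList (pvPrefix ++ PySem.Int.toChars ((n : Int) + 1)) = pvNm (n + 1) := by
        rw [hcast]; rfl
      rw [hname, hcast]
      obtain ⟨m, hm1, hm2, hm3⟩ := hstop
      have hmne : m ≠ n := fun h => hm3 (h ▸ hmem)
      obtain ⟨r, hr, hr1, hr2, hr3⟩ := ih (n + 1) ⟨m, by omega, by omega, hm3⟩
      refine ⟨r, hr, by omega, hr2, fun m' hm'1 hm'2 => ?_⟩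
      rcases Nat.eq_or_lt_of_le hm'1 with rfl | h
      · exact hmem
      · exact hr3 m' (by omega) hm'2
    · rw [if_neg hmem]
      exact ⟨n, rfl, le_refl n, hmem, fun m h1 h2 => by omega⟩

-- B's scan over a strictly increasing list returns the least value ≥ its start missing from the list
lemma pv_scan_spec : ∀ (l : List Nat), l.Pairwise (· < ·) → ∀ (n : Nat), (∀ k ∈ l, n ≤ k) →
    pvScan l n ∉ l ∧ n ≤ pvScan l n ∧ ∀ m, n ≤ m → m < pvScan l n → m ∈ l := by
  intro l
  induction l with
  | nil => intro _ n _; simp [pvScan]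
  | cons k rest ih =>
    intro hpw n hlow
    have hrest_pw : rest.Pairwise (· < ·) := hpw.of_cons
    have hk_lt : ∀ x ∈ rest, k < x := fun x hx => List.rel_of_pairwise_cons hpw hx
    rw [pvScan]
    by_cases hkn : k = n
    · rw [if_pos hkn]
      obtain ⟨h1, h2, h3⟩ := ih hrest_pw (n + 1) (fun x hx => by have := hk_lt x hx; omega)
      refine ⟨?_, by omega, ?_⟩
      · intro hmem
        rcases List.mem_cons.mp hmem with heq | hmem'
        · omega
        · exact h1 hmem'
      · intro m hm1 hm2
        rcases Nat.eq_or_lt_of_le hm1 with rfl | h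
        · exact List.mem_cons.mpr (Or.inl hkn.symm)
        · exact List.mem_cons.mpr (Or.inr (h3 m (by omega) hm2))
    · have hnk : n < k := by
        have := hlow k (List.mem_cons_self)
        omega
      rw [if_neg hkn, if_pos hnk]
      refine ⟨?_, le_refl n, fun m h1 h2 => by omega⟩
      intro hmem
      rcases List.mem_cons.mp hmem with heq | hmem'
      · omega
      · have := hk_lt n hmem'
        omega

-- the used-suffix set has no duplicates
lemma pv_used_nodup (column_names : List String) : (pvUsed column_names).Nodup := by
  rw [pvUsed]
  have main : ∀ (l : List String) (acc : PySem.Set Nat), acc.Nodup →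
      (l.foldl (fun used name =>
        if PySem.Chars.startswith name.toList pvPrefix then
          match pvSuffixValue (name.toList.drop pvPrefix.length) with
          | some k => used.add k
          | none => used
        else used) acc).Nodup := by
    intro l
    induction l with
    | nil => intro acc h; simpa using h
    | cons s t ih =>
      intro acc hacc
      rw [List.foldl_cons]
      apply ih
      by_cases hs : PySem.Chars.startswith s.toList pvPrefix
      · rw [if_pos hs]
        cases hv : pvSuffixValue (s.toList.drop pvPrefix.length) with
        | none => exact hacc
        | some v => exact PySem.Set.nodup_add acc v hacc
      · rwa [if_neg hs]
  exact main column_names PySem.Set.empty (by simp [PySem.Set.empty_eq])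

-- sorted(used) is strictly increasing
lemma pv_sorted_strict (column_names : List String) :
    (PySem.List.sorted (pvUsed column_names) (fun x => x)).Pairwise (· < ·) := by
  have h1 : (PySem.List.sorted (pvUsed column_names) (fun x => x)).Pairwise (· ≤ ·) := by
    have := PySem.List.sorted_pairwise (pvUsed column_names) (fun x => x)
    simpa using this
  have h2 : (PySem.List.sorted (pvUsed column_names) (fun x => x)).Nodup :=
    ((PySem.List.sorted_perm (pvUsed column_names) (fun x => x) false).nodup_iff).mpr
      (pv_used_nodup column_names)
  exact (h1.and h2).imp (fun h => lt_of_le_of_ne h.1 h.2)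

-- ===== VERDICT (by name: the statement is the Claim_ definition above) =====
theorem get_unique_column_name_spec : Claim_equal_get_unique_column_name := by
  intro column_names validate _
  unfold Spec_get_unique_column_name get_unique_column_name get_unique_column_name_alt
  cases validate with
  | false => simp [show PySem.Int.toChars 0 = ['0'] from rfl]
  | true =>
    simp only [if_pos]
    set S := PySem.Set.ofList column_names with hS
    set l := PySem.List.sorted (pvUsed column_names) (fun x => x) with hl
    -- A's result
    obtain ⟨m, hm1, hm2⟩ := pv_exists_free column_names
    obtain ⟨r, hr, _, hr2, hr3⟩ :=
      pv_loopA_spec S (column_names.length + 1) 0 ⟨m, by omega, by omega, hm2⟩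
    -- B's result
    obtain ⟨hb1, _, hb3⟩ := pv_scan_spec l (pv_sorted_strict column_names) 0 (fun k _ => Nat.zero_le k)
    have hmem_iff : ∀ m, m ∈ l ↔ pvNm m ∈ S := by
      intro m
      rw [hl, PySem.List.mem_sorted, pv_used_iff_mem]
    -- the two characterizations force equality
    have hEq : r = pvScan l 0 := by
      rcases lt_trichotomy r (pvScan l 0) with h | h | h
      · exact absurd ((hmem_iff r).mp (hb3 r (Nat.zero_le r) h)) hr2
      · exact h
      · exact absurd ((hmem_iff (pvScan l 0)).mpr (hr3 _ (Nat.zero_le _) h)) hb1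
    have h0 : ((0 : Int)) = ((0 : Nat) : Int) := rfl
    calc pvLoopA S (column_names.length + 1) 0 (String.ofList (pvPrefix ++ PySem.Int.toChars 0))
        = pvLoopA S (column_names.length + 1) ((0 : Nat) : Int) (pvNm 0) := by rw [← h0]; rfl
      _ = pvNm r := hr
      _ = pvNm (pvScan l 0) := by rw [hEq]
      _ = String.ofList (pvPrefix ++ PySem.Int.toChars ((pvScan l 0 : Nat) : Int)) := rfl
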